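-- pv_equiv track=rewrite | github.com/imrul18/ThesisWebsite | function.py | restegcount
-- ===== SOURCE A (Python) =====
-- def restegcount(dataset):
--     count = [0, 0, 0]
--     for x in range(1, len(dataset)):
--         if dataset[x][-1] == 1:
--             if dataset[x][6] == 0:
--                 count[0] += 1
--             elif dataset[x][6] == 1:
--                 count[1] += 1
--             else:
--                 count[2] += 1
--
--     return count
-- ===== SOURCE B (Python) =====
-- def restegcount(dataset):
--     rows = [r for r in dataset[1:] if r[-1] == 1]
--     c0 = sum(1 for r in rows if r[6] == 0)
--     c1 = sum(1 for r in rows if r[6] == 1)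
--     return [c0, c1, len(rows) - c0 - c1]
-- ===== Notes on version B (the rewrite author's own statement) =====
-- stated objective: alternative
-- what changed: Replaces A's single indexed loop with three-way branching by independent aggregates over dataset[1:]: filter the label-1 rows once, count field6==0 and field6==1 separately, and derive the else-bucket by subtraction instead of a branch.
import Mathlib
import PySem

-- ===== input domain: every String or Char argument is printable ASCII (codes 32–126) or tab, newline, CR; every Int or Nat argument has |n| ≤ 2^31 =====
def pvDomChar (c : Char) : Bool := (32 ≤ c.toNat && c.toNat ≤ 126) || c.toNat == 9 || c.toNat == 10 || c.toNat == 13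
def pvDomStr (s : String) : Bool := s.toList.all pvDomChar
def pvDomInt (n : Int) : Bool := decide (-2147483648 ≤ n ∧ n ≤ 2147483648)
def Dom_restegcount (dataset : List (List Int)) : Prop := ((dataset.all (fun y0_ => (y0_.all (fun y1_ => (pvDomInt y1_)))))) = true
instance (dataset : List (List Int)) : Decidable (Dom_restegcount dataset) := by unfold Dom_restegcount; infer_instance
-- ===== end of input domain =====

-- B computes the three buckets by independent aggregates (filter + two counts + subtraction) instead of A's branchy indexed loop; objective: alternative decomposition.

-- ===== PORT A =====
-- count[i] += 1 on the 3-element list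
def pvIncAt (count : List Int) (i : Nat) : List Int :=
  count.set i (PySem.List.pyGetD count (i : Int) 0 + 1)

def restegcount (dataset : List (List Int)) : List Int :=
  (PySem.List.pyRange 1 (dataset.length : Int) 1).foldl (fun count x =>
    let row := PySem.List.pyGetD dataset x []
    if PySem.List.pyGetD row (-1) 0 = 1 then
      if PySem.List.pyGetD row 6 0 = 0 then pvIncAt count 0
      else if PySem.List.pyGetD row 6 0 = 1 then pvIncAt count 1
      else pvIncAt count 2
    else count) [0, 0, 0]

-- ===== PORT B =====
def restegcount_alt (dataset : List (List Int)) : List Int :=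
  let rows := (dataset.drop 1).filter (fun r => PySem.List.pyGetD r (-1) 0 = 1)
  let c0 : Int := ((rows.filter (fun r => PySem.List.pyGetD r 6 0 = 0)).length : Int)
  let c1 : Int := ((rows.filter (fun r => PySem.List.pyGetD r 6 0 = 1)).length : Int)
  [c0, c1, (rows.length : Int) - c0 - c1]

-- ===== PRECONDITION & SPEC =====
-- Pre_ excludes exactly the inputs where Python A raises IndexError: an empty row after the
-- first (dataset[x][-1]) or a label-1 row shorter than 7 (dataset[x][6]). B raises there too.
def Pre_restegcount (dataset : List (List Int)) : Prop :=
  ∀ r ∈ dataset.drop 1, r ≠ [] ∧ (PySem.List.pyGetD r (-1) 0 = 1 → 7 ≤ r.length)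
instance (dataset : List (List Int)) : Decidable (Pre_restegcount dataset) := by unfold Pre_restegcount; infer_instance

def pvWitness_restegcount : List (List Int) := [[0], [5, 0, 0, 0, 0, 0, 1, 1], [5, 0, 0, 0, 0, 0, 7, 1], [2, 3]]

def Spec_restegcount (dataset : List (List Int)) (out : List Int) : Prop := out = restegcount_alt dataset
instance (dataset : List (List Int)) (out : List Int) : Decidable (Spec_restegcount dataset out) := by unfold Spec_restegcount; infer_instance

-- ===== CLAIM (what is proved, stated in full; the proofs are below) =====
def Claim_equal_restegcount : Prop := ∀ (dataset : List (List Int)), Dom_restegcount dataset → Pre_restegcount dataset → Spec_restegcount dataset (restegcount dataset)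

-- ===== LEMMAS AND PROOFS =====

-- the loop body of A's fold, after the index loop is reduced to the row list
def pvBody (count : List Int) (row : List Int) : List Int :=
  if PySem.List.pyGetD row (-1) 0 = 1 then
    if PySem.List.pyGetD row 6 0 = 0 then pvIncAt count 0
    else if PySem.List.pyGetD row 6 0 = 1 then pvIncAt count 1
    else pvIncAt count 2
  else count

lemma pvIncAt_zero (a b c : Int) : pvIncAt [a, b, c] 0 = [a + 1, b, c] := rfl
lemma pvIncAt_one (a b c : Int) : pvIncAt [a, b, c] 1 = [a, b + 1, c] := rfl
lemma pvIncAt_two (a b c : Int) : pvIncAt [a, b, c] 2 = [a, b, c + 1] := rfl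

lemma pvFold_inv (l : List (List Int)) (a b c : Int) :
    l.foldl pvBody [a, b, c] =
      [a + ((l.filter (fun r => PySem.List.pyGetD r (-1) 0 = 1)).filter
              (fun r => PySem.List.pyGetD r 6 0 = 0)).length,
       b + ((l.filter (fun r => PySem.List.pyGetD r (-1) 0 = 1)).filter
              (fun r => PySem.List.pyGetD r 6 0 = 1)).length,
       c + ((l.filter (fun r => PySem.List.pyGetD r (-1) 0 = 1)).length : Int)
         - ((l.filter (fun r => PySem.List.pyGetD r (-1) 0 = 1)).filter
              (fun r => PySem.List.pyGetD r 6 0 = 0)).length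
         - ((l.filter (fun r => PySem.List.pyGetD r (-1) 0 = 1)).filter
              (fun r => PySem.List.pyGetD r 6 0 = 1)).length] := by
  induction l generalizing a b c with
  | nil => simp
  | cons r t ih =>
    simp only [List.foldl_cons, List.filter_cons]
    by_cases h1 : PySem.List.pyGetD r (-1) 0 = 1
    · by_cases h2 : PySem.List.pyGetD r 6 0 = 0
      · simp only [pvBody, h1, h2]
        norm_num [pvIncAt_zero]
        rw [ih]
        simp [h2, List.cons.injEq]
        omega
      · by_cases h3 : PySem.List.pyGetD r 6 0 = 1
        · simp only [pvBody, h1, h3]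
          norm_num [pvIncAt_one, h2]
          rw [ih]
          simp [h3, List.cons.injEq]
          omega
        · simp only [pvBody, h1, if_neg h2, if_neg h3]
          norm_num [pvIncAt_two, h2, h3]
          rw [ih]
          simp [List.cons.injEq]
          omega
    · simp [pvBody, h1, ih]

-- ===== VERDICT (by name: the statement is the Claim_ definition above) =====
theorem restegcount_spec : Claim_equal_restegcount := by
  intro dataset _ _
  unfold Spec_restegcount restegcount restegcount_alt
  rw [show (fun count x =>
        let row := PySem.List.pyGetD dataset x []
        if PySem.List.pyGetD row (-1) 0 = 1 then
          if PySem.List.pyGetD row 6 0 = 0 then pvIncAt count 0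
          else if PySem.List.pyGetD row 6 0 = 1 then pvIncAt count 1
          else pvIncAt count 2
        else count) = (fun count x => pvBody count (PySem.List.pyGetD dataset x [])) from rfl]
  rw [PySem.List.foldl_pyRange_pyGetD' dataset [] pvBody [0,0,0] (by norm_num : (0:Int) ≤ 1)]
  simpa using pvFold_inv (dataset.drop 1) 0 0 0
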